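-- pv_equiv track=rewrite | github.com/linc-ufpa-br/structure-analysis-BBB | filter.py | nmPepFilter
-- ===== SOURCE A (Python) =====
-- oneLetterCode = ['A', 'R', 'N', 'D', 'B',
--                      'C','E', 'Q', 'Z', 'G',
--                      'H','I','L', 'K', 'M', 'F',
--                      'P','S','T', 'W','Y', 'V']
--
-- def nmPepFilter(peptide):
--     verify = True
--     for letter in peptide:
--         verify = letter in oneLetterCode
--         if verify is False:
--             return 'M'
--     if verify is True:
--         return 'N'
-- ===== SOURCE B (Python) =====
-- oneLetterCode = ['A', 'R', 'N', 'D', 'B',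
--                      'C','E', 'Q', 'Z', 'G',
--                      'H','I','L', 'K', 'M', 'F',
--                      'P','S','T', 'W','Y', 'V']
--
-- def nmPepFilter(peptide):
--     # The 22 one-letter codes are pairwise distinct, so the per-code counts
--     # partition the valid positions: their sum equals len(peptide) exactly
--     # when every letter of the peptide is a valid code.
--     return 'N' if sum(peptide.count(c) for c in oneLetterCode) == len(peptide) else 'M'
-- ===== Notes on version B (the rewrite author's own statement) =====
-- stated objective: alternative
-- what changed: Instead of scanning the peptide letter by letter with an early return, B iterates over the 22 valid codes, sums peptide.count(c) for each, and reports validity iff the total equals len(peptide) (counts of distinct codes partition the valid positions).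
import Mathlib
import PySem

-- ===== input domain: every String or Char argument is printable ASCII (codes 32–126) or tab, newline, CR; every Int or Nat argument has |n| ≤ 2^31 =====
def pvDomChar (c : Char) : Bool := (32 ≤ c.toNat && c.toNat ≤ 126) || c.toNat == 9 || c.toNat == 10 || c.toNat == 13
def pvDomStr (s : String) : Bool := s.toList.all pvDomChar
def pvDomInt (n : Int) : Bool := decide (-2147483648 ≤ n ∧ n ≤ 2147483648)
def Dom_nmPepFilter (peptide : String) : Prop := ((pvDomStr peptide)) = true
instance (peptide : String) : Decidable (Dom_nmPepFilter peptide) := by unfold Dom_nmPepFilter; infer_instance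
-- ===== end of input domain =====

-- B replaces A's letter-by-letter scan with early return by a per-code counting pass:
-- it sums peptide.count(c) over the 22 distinct codes and compares the total with
-- len(peptide) (alternative decomposition, same cost).

def oneLetterCode : List Char :=
  ['A', 'R', 'N', 'D', 'B',
   'C', 'E', 'Q', 'Z', 'G',
   'H', 'I', 'L', 'K', 'M', 'F',
   'P', 'S', 'T', 'W', 'Y', 'V']

-- ===== PORT A =====
-- letter-by-letter loop; returning "M" models A's early 'return' on an invalid letter,
-- reaching the empty list models falling out of the loop with verify = True, hence "N"
def nmPepFilterGo : List Char → String
  | [] => "N"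
  | letter :: rest => if oneLetterCode.contains letter then nmPepFilterGo rest else "M"

def nmPepFilter (peptide : String) : String :=
  nmPepFilterGo peptide.toList

-- ===== PORT B =====
-- sum(peptide.count(c) for c in oneLetterCode): a fold over the codes adding
-- the count of each code in the peptide (peptide.count(c) for a single character
-- is exactly List.count on the character list); len(peptide) is toList.length
def nmPepFilter_alt (peptide : String) : String :=
  if oneLetterCode.foldl (fun acc c => acc + peptide.toList.count c) 0 = peptide.toList.length
  then "N" else "M"

-- ===== PRECONDITION & SPEC =====
def Spec_nmPepFilter (peptide : String) (out : String) : Prop := out = nmPepFilter_alt peptide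
instance (peptide : String) (out : String) : Decidable (Spec_nmPepFilter peptide out) := by unfold Spec_nmPepFilter; infer_instance

-- ===== CLAIM (what is proved, stated in full; the proofs are below) =====
def Claim_equal_nmPepFilter : Prop := ∀ (peptide : String), Dom_nmPepFilter peptide → Spec_nmPepFilter peptide (nmPepFilter peptide)

-- ===== LEMMAS AND PROOFS =====

-- A's loop returns "N" exactly when every letter is a valid code
theorem nmPepFilterGo_eq_N_iff (l : List Char) :
    nmPepFilterGo l = "N" ↔ ∀ c ∈ l, c ∈ oneLetterCode := by
  induction l with
  | nil => simp [nmPepFilterGo]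
  | cons c rest ih =>
    by_cases h : c ∈ oneLetterCode
    · simp [nmPepFilterGo, h, ih]
    · simp [nmPepFilterGo, h]

theorem nmPepFilterGo_eq_M_of (l : List Char) (h : ¬ ∀ c ∈ l, c ∈ oneLetterCode) :
    nmPepFilterGo l = "M" := by
  induction l with
  | nil => simp at h
  | cons c rest ih =>
    by_cases hc : c ∈ oneLetterCode
    · simp only [nmPepFilterGo, List.contains_iff_mem, if_pos hc]
      exact ih (fun h' => h (by
        intro x hx
        rcases List.mem_cons.mp hx with rfl | hx'
        · exact hc
        · exact h' x hx'))
    · simp [nmPepFilterGo, hc]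

-- the fold over the codes is the sum of the per-code counts
theorem foldl_add_count (codes l : List Char) (a : Nat) :
    codes.foldl (fun acc c => acc + l.count c) a = a + (codes.map (fun c => l.count c)).sum := by
  induction codes generalizing a with
  | nil => simp
  | cons c cs ih => simp [List.foldl_cons, ih, Nat.add_assoc]

-- two disjoint Bool tests count additively
theorem countP_or_disjoint (p q : Char → Bool) (h : ∀ x, ¬(p x = true ∧ q x = true)) (l : List Char) :
    l.countP (fun x => p x || q x) = l.countP p + l.countP q := by
  induction l with
  | nil => simp
  | cons x l ih =>
    by_cases hp : p x = true <;> by_cases hq : q x = true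
    · exact absurd ⟨hp, hq⟩ (h x)
    all_goals (simp [hp, hq, ih]; try omega)

-- for a duplicate-free code list, the summed counts are the number of valid positions
theorem sum_counts_eq_countP (codes : List Char) (hnd : codes.Nodup) (l : List Char) :
    (codes.map (fun c => l.count c)).sum = l.countP (fun x => decide (x ∈ codes)) := by
  induction codes with
  | nil => simp
  | cons c cs ih =>
    obtain ⟨hc, hnd'⟩ := List.nodup_cons.mp hnd
    have hfun : (fun x => decide (x ∈ c :: cs)) = (fun x => (x == c) || decide (x ∈ cs)) := by
      funext x; by_cases hx : x = c <;> simp [hx, List.mem_cons]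
    have hd : ∀ x, ¬((x == c) = true ∧ decide (x ∈ cs) = true) := by
      rintro x ⟨h1, h2⟩
      exact hc (beq_iff_eq.mp h1 ▸ of_decide_eq_true h2)
    rw [List.map_cons, List.sum_cons, ih hnd', hfun,
        countP_or_disjoint _ _ hd, List.count_eq_countP]

-- ===== VERDICT (by name: the statement is the Claim_ definition above) =====
theorem nmPepFilter_spec : Claim_equal_nmPepFilter := by
  intro peptide _
  unfold Spec_nmPepFilter nmPepFilter nmPepFilter_alt
  have hnd : oneLetterCode.Nodup := by decide
  have hsum : oneLetterCode.foldl (fun acc c => acc + peptide.toList.count c) 0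
      = peptide.toList.countP (fun x => decide (x ∈ oneLetterCode)) := by
    rw [foldl_add_count, sum_counts_eq_countP oneLetterCode hnd]; simp
  have hiff : peptide.toList.countP (fun x => decide (x ∈ oneLetterCode)) = peptide.toList.length
      ↔ ∀ c ∈ peptide.toList, c ∈ oneLetterCode := by
    rw [List.countP_eq_length]; simp
  by_cases h : ∀ c ∈ peptide.toList, c ∈ oneLetterCode
  · rw [(nmPepFilterGo_eq_N_iff _).mpr h, hsum, if_pos (hiff.mpr h)]
  · rw [nmPepFilterGo_eq_M_of _ h, hsum, if_neg (fun hs => h (hiff.mp hs))]
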